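-- pv_equiv track=rewrite | github.com/Vansh-Sharma27/delhi-scheme-saathi | src/services/response_generator.py | _infer_income_segment
-- ===== SOURCE A (Python) =====
-- def _infer_income_segment(income_limits: dict[str, int], annual_income: int | None) -> str | None:
--     """Infer the first matching income band from configured cutoffs."""
--     if annual_income is None:
--         return None
--
--     normalized_limits: list[tuple[str, int]] = []
--     for segment, raw_limit in income_limits.items():
--         try:
--             normalized_limits.append((str(segment).upper(), int(raw_limit)))
--         except (TypeError, ValueError):
--             continue
--
--     for segment, limit in sorted(normalized_limits, key=lambda item: item[1]):
--         if annual_income <= limit: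
--             return segment
--     return None
-- ===== SOURCE B (Python) =====
-- def _infer_income_segment(income_limits, annual_income):
--     """Single linear pass: keep the first segment whose limit qualifies with the
--     strictly smallest limit (strict < preserves A's stable-sort tie-break)."""
--     if annual_income is None:
--         return None
--     best_segment = None
--     best_limit = None
--     for segment, raw_limit in income_limits.items():
--         limit = int(raw_limit)
--         if annual_income <= limit and (best_limit is None or limit < best_limit):
--             best_segment, best_limit = segment, limit
--     if best_limit is None:
--         return None
--     return str(best_segment).upper()
-- ===== Notes on version B (the rewrite author's own statement) =====
-- stated objective: faster
-- what changed: Replaces normalize-then-sort-then-scan with a single linear pass that tracks the qualifying segment of strictly smallest limit (strict < reproduces the stable sort's first-occurrence tie-break), uppercasing only the final winner.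
import Mathlib
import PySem

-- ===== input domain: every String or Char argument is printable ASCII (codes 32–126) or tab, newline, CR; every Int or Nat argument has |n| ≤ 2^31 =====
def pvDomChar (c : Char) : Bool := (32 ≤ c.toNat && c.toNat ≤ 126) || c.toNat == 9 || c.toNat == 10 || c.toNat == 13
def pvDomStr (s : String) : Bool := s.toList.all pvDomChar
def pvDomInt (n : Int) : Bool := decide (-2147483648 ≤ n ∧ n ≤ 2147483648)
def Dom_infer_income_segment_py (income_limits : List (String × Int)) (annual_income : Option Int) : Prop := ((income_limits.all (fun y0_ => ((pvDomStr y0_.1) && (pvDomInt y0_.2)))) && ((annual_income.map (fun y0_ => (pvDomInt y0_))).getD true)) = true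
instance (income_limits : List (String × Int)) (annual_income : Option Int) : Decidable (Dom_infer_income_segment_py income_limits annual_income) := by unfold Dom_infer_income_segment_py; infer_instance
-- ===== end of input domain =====

-- ===== PORT A =====
-- B changes the algorithm: one linear pass instead of normalize + sort + scan (objective: faster).
-- A's loop 'for … in sorted(…): if annual_income <= limit: return segment' as structural recursion.
def pvFirstLE (income : Int) : List (String × Int) → Option String
  | [] => none
  | (s, l) :: t => if income ≤ l then some s else pvFirstLE income t

-- Port of A. On dict[str,int] arguments str(segment) is the identity and int(raw_limit)
-- never raises, so the try/except body always appends (exact on the typed domain).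
def infer_income_segment_py (income_limits : List (String × Int)) (annual_income : Option Int) : Option String :=
  match annual_income with
  | none => none
  | some income =>
      let normalized : List (String × Int) :=
        income_limits.foldl (fun acc p => acc ++ [(PySem.Str.upper p.1, p.2)]) []
      pvFirstLE income (PySem.List.sorted normalized (fun p => p.2) false)

-- ===== PORT B =====
-- B's loop body: keep (segment, limit) when it qualifies and strictly beats the best so far.
def pvStep (income : Int) (best : Option (String × Int)) (p : String × Int) : Option (String × Int) :=
  match best with
  | none => if income ≤ p.2 then some p else none
  | some b => if income ≤ p.2 ∧ p.2 < b.2 then some p else some b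

def infer_income_segment_py_alt (income_limits : List (String × Int)) (annual_income : Option Int) : Option String :=
  match annual_income with
  | none => none
  | some income =>
      match income_limits.foldl (pvStep income) none with
      | none => none
      | some b => some (PySem.Str.upper b.1)

-- ===== PRECONDITION & SPEC =====
def Spec_infer_income_segment_py (income_limits : List (String × Int)) (annual_income : Option Int) (out : Option String) : Prop := out = infer_income_segment_py_alt income_limits annual_income
instance (income_limits : List (String × Int)) (annual_income : Option Int) (out : Option String) : Decidable (Spec_infer_income_segment_py income_limits annual_income out) := by unfold Spec_infer_income_segment_py; infer_instance

-- ===== CLAIM (what is proved, stated in full; the proofs are below) =====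
def Claim_equal_infer_income_segment_py : Prop := ∀ (income_limits : List (String × Int)) (annual_income : Option Int), Dom_infer_income_segment_py income_limits annual_income → Spec_infer_income_segment_py income_limits annual_income (infer_income_segment_py income_limits annual_income)

-- ===== LEMMAS AND PROOFS =====

-- first qualifying PAIR of a list (proof-side refinement of A's scan)
def pvFirstQ (income : Int) : List (String × Int) → Option (String × Int)
  | [] => none
  | p :: t => if income ≤ p.2 then some p else pvFirstQ income t

theorem pvFirstLE_eq_firstQ (income : Int) (L : List (String × Int)) :
    pvFirstLE income L = (pvFirstQ income L).map (·.1) := by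
  induction L with
  | nil => rfl
  | cons p t ih =>
      obtain ⟨s, l⟩ := p
      simp only [pvFirstLE, pvFirstQ]
      split_ifs <;> simp [ih]

theorem mem_of_firstQ {income : Int} {L : List (String × Int)} {m : String × Int}
    (h : pvFirstQ income L = some m) : m ∈ L ∧ income ≤ m.2 := by
  induction L with
  | nil => simp [pvFirstQ] at h
  | cons p t ih =>
      simp only [pvFirstQ] at h
      split_ifs at h with hq
      · cases h; exact ⟨List.mem_cons_self, hq⟩
      · obtain ⟨hm, hle⟩ := ih h
        exact ⟨List.mem_cons_of_mem _ hm, hle⟩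

-- scanning after a stable insertion equals one step of B's loop (on a sorted list)
theorem firstQ_insertBy (income : Int) (y : String × Int) (L : List (String × Int))
    (hs : L.Pairwise (fun a b => a.2 ≤ b.2)) :
    pvFirstQ income (PySem.List.insertBy (fun a b => decide (a.2 < b.2)) y L)
      = pvStep income (pvFirstQ income L) y := by
  induction L with
  | nil => rfl
  | cons b t ih =>
      have hbt : ∀ x ∈ t, b.2 ≤ x.2 := (List.pairwise_cons.mp hs).1
      have hst : t.Pairwise (fun a b => a.2 ≤ b.2) := (List.pairwise_cons.mp hs).2
      by_cases hlt : y.2 < b.2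
      · rw [show PySem.List.insertBy (fun a b => decide (a.2 < b.2)) y (b :: t)
              = y :: b :: t from by simp [PySem.List.insertBy, hlt]]
        by_cases hqy : income ≤ y.2
        · rw [show pvFirstQ income (y :: b :: t) = some y from by simp [pvFirstQ, hqy]]
          cases hQ : pvFirstQ income (b :: t) with
          | none => simp [pvStep, hqy]
          | some m =>
              have hlt2 : y.2 < m.2 := by
                obtain ⟨hm, -⟩ := mem_of_firstQ hQ
                rcases List.mem_cons.mp hm with h | h
                · rw [h]; exact hlt
                · exact lt_of_lt_of_le hlt (hbt m h)
              simp [pvStep, hqy, hlt2]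
        · rw [show pvFirstQ income (y :: b :: t) = pvFirstQ income (b :: t) from by
                simp [pvFirstQ, hqy]]
          cases hQ : pvFirstQ income (b :: t) <;> simp [pvStep, hqy]
      · rw [show PySem.List.insertBy (fun a b => decide (a.2 < b.2)) y (b :: t)
              = b :: PySem.List.insertBy (fun a b => decide (a.2 < b.2)) y t from by
                simp [PySem.List.insertBy, hlt]]
        by_cases hqb : income ≤ b.2
        · have hno : ¬ (income ≤ y.2 ∧ y.2 < b.2) := fun h => hlt h.2
          simp [pvFirstQ, hqb, pvStep, hno]
        · simp only [pvFirstQ, if_neg hqb]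
          exact ih hst

-- A's scan of the sorted list IS B's loop
theorem firstQ_sorted (income : Int) (xs : List (String × Int)) :
    pvFirstQ income (PySem.List.sorted xs (fun p => p.2) false)
      = xs.foldl (pvStep income) none := by
  induction xs using List.reverseRecOn with
  | nil => rfl
  | append_singleton t y ih =>
      rw [List.foldl_append, PySem.List.sorted_eq_foldl_insertBy, List.foldl_append,
          ← PySem.List.sorted_eq_foldl_insertBy]
      simp only [List.foldl_cons, List.foldl_nil]
      rw [firstQ_insertBy income y _ (PySem.List.sorted_pairwise t (fun p => p.2)), ih]

-- uppercasing the segments commutes with B's loop (the limit component is untouched)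
theorem foldl_step_map_upper (income : Int) (xs : List (String × Int))
    (acc : Option (String × Int)) :
    (xs.map (fun p => (PySem.Str.upper p.1, p.2))).foldl (pvStep income)
        (acc.map (fun p => (PySem.Str.upper p.1, p.2)))
      = (xs.foldl (pvStep income) acc).map (fun p => (PySem.Str.upper p.1, p.2)) := by
  induction xs generalizing acc with
  | nil => rfl
  | cons p t ih =>
      simp only [List.map_cons, List.foldl_cons]
      have : pvStep income (acc.map (fun p => (PySem.Str.upper p.1, p.2)))
          (PySem.Str.upper p.1, p.2)
          = (pvStep income acc p).map (fun p => (PySem.Str.upper p.1, p.2)) := by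
        cases acc with
        | none => simp only [Option.map_none, pvStep]; split_ifs <;> rfl
        | some b => simp only [Option.map_some, pvStep]; split_ifs <;> rfl
      rw [this, ih]

-- ===== VERDICT (by name: the statement is the Claim_ definition above) =====
theorem infer_income_segment_py_spec : Claim_equal_infer_income_segment_py := by
  intro income_limits annual_income _
  unfold Spec_infer_income_segment_py
  cases annual_income with
  | none => rfl
  | some income =>
      simp only [infer_income_segment_py, infer_income_segment_py_alt]
      rw [PySem.List.foldl_append_singleton_eq_map, List.nil_append,
          pvFirstLE_eq_firstQ, firstQ_sorted]
      have hmap := foldl_step_map_upper income income_limits none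
      simp only [Option.map_none] at hmap
      rw [hmap]
      cases income_limits.foldl (pvStep income) none <;> rfl
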